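-- pv_equiv track=rewrite | github.com/MynxBit/omegaJ | omegaj_agent/pipelines/phase5_groq_integration/omegaJ_phase5_groq.py | behavioral_inference
-- ===== SOURCE A (Python) =====
-- from typing import List, Dict, Any, Optional, Tuple
--
-- def behavioral_inference(iocs: List[Dict[str, Any]]) -> List[str]:
-- 	behaviors = set()
-- 	for item in iocs:
-- 		t = str(item.get("type", "")).lower()
-- 		v = str(item.get("value", "")).lower()
-- 		if t == "registry_key" or ("run" in v or "autorun" in v):
-- 			behaviors.add("persistence")
-- 		if t in ["url", "ip"] or "c2" in v:
-- 			behaviors.add("network_activity")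
-- 		if t == "suspicious_command" or "powershell" in v or "cmd" in v:
-- 			behaviors.add("execution_vector")
-- 		if t == "suspicious_file" or v.endswith((".exe", ".dll", ".bat", ".cmd")):
-- 			behaviors.add("file_execution")
-- 	return sorted(list(behaviors))
-- ===== SOURCE B (Python) =====
-- def behavioral_inference(iocs):
--     rules = [
--         ("execution_vector", lambda t, v: t == "suspicious_command" or "powershell" in v or "cmd" in v),
--         ("file_execution", lambda t, v: t == "suspicious_file" or v.endswith((".exe", ".dll", ".bat", ".cmd"))),
--         ("network_activity", lambda t, v: t in ["url", "ip"] or "c2" in v),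
--         ("persistence", lambda t, v: t == "registry_key" or "run" in v or "autorun" in v),
--     ]
--     pairs = [(str(item.get("type", "")).lower(), str(item.get("value", "")).lower()) for item in iocs]
--     return [tag for tag, pred in rules if any(pred(t, v) for t, v in pairs)]
-- ===== Notes on version B (the rewrite author's own statement) =====
-- stated objective: idiomatic
-- what changed: A makes one items-outer pass accumulating a mutable set with four inline branches and sorts it at the end; B builds a rules table (tag, predicate) listed in sorted order and emits each tag whose predicate holds for any item, flipping the loop nesting to tags-outer/items-inner with any() short-circuit and no set or sort.
import Mathlib
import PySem

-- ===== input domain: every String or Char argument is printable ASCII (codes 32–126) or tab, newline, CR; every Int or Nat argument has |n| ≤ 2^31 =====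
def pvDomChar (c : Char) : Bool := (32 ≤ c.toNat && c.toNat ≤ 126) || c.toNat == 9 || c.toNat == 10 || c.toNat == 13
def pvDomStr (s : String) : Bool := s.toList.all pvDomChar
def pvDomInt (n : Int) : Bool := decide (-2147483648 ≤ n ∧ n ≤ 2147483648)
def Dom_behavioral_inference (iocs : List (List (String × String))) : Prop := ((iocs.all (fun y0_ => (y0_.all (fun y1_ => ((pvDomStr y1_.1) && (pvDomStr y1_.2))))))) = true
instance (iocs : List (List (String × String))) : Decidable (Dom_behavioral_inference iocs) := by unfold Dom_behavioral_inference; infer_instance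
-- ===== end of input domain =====

-- B replaces A's single items-outer pass that accumulates a set and sorts it by a rules
-- table iterated tags-outer (already in sorted order) with an any() scan of the items per tag (objective: idiomatic).

-- ===== PORT A =====
def behavioral_inference (iocs : List (List (String × String))) : List String :=
  let behaviors : PySem.Set String :=
    iocs.foldl (fun behaviors item =>
      let t := PySem.Str.lower (PySem.Dict.getD (PySem.Dict.mk item) "type" "")
      let v := PySem.Str.lower (PySem.Dict.getD (PySem.Dict.mk item) "value" "")
      let behaviors := if t == "registry_key" || (PySem.Str.isIn "run" v || PySem.Str.isIn "autorun" v) then PySem.Set.add behaviors "persistence" else behaviors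
      let behaviors := if (t == "url" || t == "ip") || PySem.Str.isIn "c2" v then PySem.Set.add behaviors "network_activity" else behaviors
      let behaviors := if t == "suspicious_command" || PySem.Str.isIn "powershell" v || PySem.Str.isIn "cmd" v then PySem.Set.add behaviors "execution_vector" else behaviors
      let behaviors := if t == "suspicious_file" || (PySem.Str.endswith v ".exe" || PySem.Str.endswith v ".dll" || PySem.Str.endswith v ".bat" || PySem.Str.endswith v ".cmd") then PySem.Set.add behaviors "file_execution" else behaviors
      behaviors) PySem.Set.empty
  PySem.List.sorted behaviors (fun x => x) false

-- ===== PORT B =====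
def bi_rules : List (String × (String → String → Bool)) :=
  [("execution_vector", fun t v => t == "suspicious_command" || PySem.Str.isIn "powershell" v || PySem.Str.isIn "cmd" v),
   ("file_execution",   fun t v => t == "suspicious_file" || (PySem.Str.endswith v ".exe" || PySem.Str.endswith v ".dll" || PySem.Str.endswith v ".bat" || PySem.Str.endswith v ".cmd")),
   ("network_activity", fun t v => (t == "url" || t == "ip") || PySem.Str.isIn "c2" v),
   ("persistence",      fun t v => t == "registry_key" || (PySem.Str.isIn "run" v || PySem.Str.isIn "autorun" v))]

def behavioral_inference_alt (iocs : List (List (String × String))) : List String :=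
  let pairs := iocs.map (fun item =>
    (PySem.Str.lower (PySem.Dict.getD (PySem.Dict.mk item) "type" ""),
     PySem.Str.lower (PySem.Dict.getD (PySem.Dict.mk item) "value" "")))
  (bi_rules.filter (fun r => pairs.any (fun p => r.2 p.1 p.2))).map (fun r => r.1)

-- ===== PRECONDITION & SPEC =====
def Spec_behavioral_inference (iocs : List (List (String × String))) (out : List String) : Prop := out = behavioral_inference_alt iocs
instance (iocs : List (List (String × String))) (out : List String) : Decidable (Spec_behavioral_inference iocs out) := by unfold Spec_behavioral_inference; infer_instance

-- ===== CLAIM (what is proved, stated in full; the proofs are below) =====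
def Claim_equal_behavioral_inference : Prop := ∀ (iocs : List (List (String × String))), Dom_behavioral_inference iocs → Spec_behavioral_inference iocs (behavioral_inference iocs)

-- ===== LEMMAS AND PROOFS =====

-- the lowercased (type, value) pair of one item
def bi_tv (item : List (String × String)) : String × String :=
  (PySem.Str.lower (PySem.Dict.getD (PySem.Dict.mk item) "type" ""),
   PySem.Str.lower (PySem.Dict.getD (PySem.Dict.mk item) "value" ""))

-- the four per-item conditions, through the rules table
def bi_cond (i : Nat) (item : List (String × String)) : Bool :=
  match bi_rules[i]? with
  | some r => r.2 (bi_tv item).1 (bi_tv item).2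
  | none => false

-- A's loop body, named for the induction (definitionally A's fold step)
def bi_step (behaviors : PySem.Set String) (item : List (String × String)) : PySem.Set String :=
  let behaviors := if bi_cond 3 item then PySem.Set.add behaviors "persistence" else behaviors
  let behaviors := if bi_cond 2 item then PySem.Set.add behaviors "network_activity" else behaviors
  let behaviors := if bi_cond 0 item then PySem.Set.add behaviors "execution_vector" else behaviors
  if bi_cond 1 item then PySem.Set.add behaviors "file_execution" else behaviors

lemma behavioral_inference_eq_fold (iocs : List (List (String × String))) :
    behavioral_inference iocs = PySem.List.sorted (iocs.foldl bi_step PySem.Set.empty) (fun x => x) false := rfl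

lemma mem_add_if (s : PySem.Set String) (c : Bool) (y x : String) :
    x ∈ (if c then PySem.Set.add s y else s) ↔ x ∈ s ∨ (x = y ∧ c) := by
  cases c <;> simp [PySem.Set.mem_add]

lemma nodup_add_if (s : PySem.Set String) (c : Bool) (y : String) (h : s.Nodup) :
    (if c then PySem.Set.add s y else s).Nodup := by
  cases c
  · exact h
  · exact PySem.Set.nodup_add s y h

lemma bi_step_nodup (s : PySem.Set String) (item : List (String × String)) (h : s.Nodup) :
    (bi_step s item).Nodup := by
  unfold bi_step
  exact nodup_add_if _ _ _ (nodup_add_if _ _ _ (nodup_add_if _ _ _ (nodup_add_if _ _ _ h)))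

lemma nodup_foldA (iocs : List (List (String × String))) (init : PySem.Set String) (h : init.Nodup) :
    (iocs.foldl bi_step init).Nodup := by
  induction iocs generalizing init with
  | nil => exact h
  | cons a l ih => exact ih _ (bi_step_nodup _ _ h)

lemma mem_bi_step (s : PySem.Set String) (item : List (String × String)) (x : String) :
    x ∈ bi_step s item ↔ x ∈ s
      ∨ (x = "persistence" ∧ bi_cond 3 item)
      ∨ (x = "network_activity" ∧ bi_cond 2 item)
      ∨ (x = "execution_vector" ∧ bi_cond 0 item)
      ∨ (x = "file_execution" ∧ bi_cond 1 item) := by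
  unfold bi_step
  simp only [mem_add_if]
  simp only [or_assoc]

-- pure propositional shuffle used to merge one step's conditions into the fold invariant
lemma bi_or_shuffle (S q1 q2 q3 q4 a1 b1 a2 b2 a3 b3 a4 b4 : Prop) :
    ((S ∨ (q1 ∧ a1) ∨ (q2 ∧ a2) ∨ (q3 ∧ a3) ∨ (q4 ∧ a4)) ∨ (q1 ∧ b1) ∨ (q2 ∧ b2) ∨ (q3 ∧ b3) ∨ (q4 ∧ b4))
      ↔ (S ∨ (q1 ∧ (a1 ∨ b1)) ∨ (q2 ∧ (a2 ∨ b2)) ∨ (q3 ∧ (a3 ∨ b3)) ∨ (q4 ∧ (a4 ∨ b4))) := by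
  tauto

lemma mem_foldA (iocs : List (List (String × String))) (init : PySem.Set String) (x : String) :
    x ∈ iocs.foldl bi_step init ↔ x ∈ init
      ∨ (x = "persistence" ∧ iocs.any (bi_cond 3))
      ∨ (x = "network_activity" ∧ iocs.any (bi_cond 2))
      ∨ (x = "execution_vector" ∧ iocs.any (bi_cond 0))
      ∨ (x = "file_execution" ∧ iocs.any (bi_cond 1)) := by
  induction iocs generalizing init with
  | nil => simp
  | cons a l ih =>
    rw [List.foldl_cons, ih, mem_bi_step]
    simp only [List.any_cons, Bool.or_eq_true]
    exact bi_or_shuffle _ _ _ _ _ _ _ _ _ _ _ _ _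

-- B's output, rewritten as a four-way case split over the (sorted) tag list
def bi_out (iocs : List (List (String × String))) : List String :=
  (if iocs.any (bi_cond 0) then ["execution_vector"] else [])
    ++ (if iocs.any (bi_cond 1) then ["file_execution"] else [])
    ++ (if iocs.any (bi_cond 2) then ["network_activity"] else [])
    ++ (if iocs.any (bi_cond 3) then ["persistence"] else [])

lemma any_alt_0 (iocs : List (List (String × String))) :
    ((iocs.map (fun item =>
        (PySem.Str.lower (PySem.Dict.getD (PySem.Dict.mk item) "type" ""),
         PySem.Str.lower (PySem.Dict.getD (PySem.Dict.mk item) "value" "")))).any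
      (fun p => p.1 == "suspicious_command" || PySem.Str.isIn "powershell" p.2 || PySem.Str.isIn "cmd" p.2))
    = iocs.any (bi_cond 0) := by
  rw [List.any_map]; rfl

lemma any_alt_1 (iocs : List (List (String × String))) :
    ((iocs.map (fun item =>
        (PySem.Str.lower (PySem.Dict.getD (PySem.Dict.mk item) "type" ""),
         PySem.Str.lower (PySem.Dict.getD (PySem.Dict.mk item) "value" "")))).any
      (fun p => p.1 == "suspicious_file" || (PySem.Str.endswith p.2 ".exe" || PySem.Str.endswith p.2 ".dll" || PySem.Str.endswith p.2 ".bat" || PySem.Str.endswith p.2 ".cmd")))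
    = iocs.any (bi_cond 1) := by
  rw [List.any_map]; rfl

lemma any_alt_2 (iocs : List (List (String × String))) :
    ((iocs.map (fun item =>
        (PySem.Str.lower (PySem.Dict.getD (PySem.Dict.mk item) "type" ""),
         PySem.Str.lower (PySem.Dict.getD (PySem.Dict.mk item) "value" "")))).any
      (fun p => (p.1 == "url" || p.1 == "ip") || PySem.Str.isIn "c2" p.2))
    = iocs.any (bi_cond 2) := by
  rw [List.any_map]; rfl

lemma any_alt_3 (iocs : List (List (String × String))) :
    ((iocs.map (fun item =>
        (PySem.Str.lower (PySem.Dict.getD (PySem.Dict.mk item) "type" ""),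
         PySem.Str.lower (PySem.Dict.getD (PySem.Dict.mk item) "value" "")))).any
      (fun p => p.1 == "registry_key" || (PySem.Str.isIn "run" p.2 || PySem.Str.isIn "autorun" p.2)))
    = iocs.any (bi_cond 3) := by
  rw [List.any_map]; rfl

lemma alt_eq_bi_out (iocs : List (List (String × String))) :
    behavioral_inference_alt iocs = bi_out iocs := by
  unfold behavioral_inference_alt bi_rules bi_out
  simp only [List.filter_cons, List.filter_nil, any_alt_0, any_alt_1, any_alt_2, any_alt_3]
  cases iocs.any (bi_cond 0) <;> cases iocs.any (bi_cond 1) <;>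
    cases iocs.any (bi_cond 2) <;> cases iocs.any (bi_cond 3) <;> rfl

lemma bi_out_pairwise_lt (iocs : List (List (String × String))) :
    (bi_out iocs).Pairwise (fun a b => a < b) := by
  unfold bi_out
  cases iocs.any (bi_cond 0) <;> cases iocs.any (bi_cond 1) <;>
    cases iocs.any (bi_cond 2) <;> cases iocs.any (bi_cond 3) <;>
    simp <;> decide

lemma bi_out_nodup (iocs : List (List (String × String))) : (bi_out iocs).Nodup :=
  (bi_out_pairwise_lt iocs).imp (fun h => ne_of_lt h)

lemma mem_bi_out (iocs : List (List (String × String))) (x : String) :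
    x ∈ bi_out iocs ↔
      (x = "persistence" ∧ iocs.any (bi_cond 3))
      ∨ (x = "network_activity" ∧ iocs.any (bi_cond 2))
      ∨ (x = "execution_vector" ∧ iocs.any (bi_cond 0))
      ∨ (x = "file_execution" ∧ iocs.any (bi_cond 1)) := by
  unfold bi_out
  cases h0 : iocs.any (bi_cond 0) <;> cases h1 : iocs.any (bi_cond 1) <;>
    cases h2 : iocs.any (bi_cond 2) <;> cases h3 : iocs.any (bi_cond 3) <;>
    simp <;> tauto

lemma foldA_perm_bi_out (iocs : List (List (String × String))) :
    (bi_out iocs).Perm (iocs.foldl bi_step PySem.Set.empty) := by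
  rw [List.perm_ext_iff_of_nodup (bi_out_nodup iocs)
    (nodup_foldA iocs PySem.Set.empty List.nodup_nil)]
  intro x
  rw [mem_bi_out, mem_foldA]
  simp only [PySem.Set.empty, List.not_mem_nil, false_or]

-- ===== VERDICT (by name: the statement is the Claim_ definition above) =====
theorem behavioral_inference_spec : Claim_equal_behavioral_inference := by
  intro iocs _
  unfold Spec_behavioral_inference
  rw [behavioral_inference_eq_fold, alt_eq_bi_out]
  exact PySem.List.sorted_eq_of_perm_of_pairwise_lt _ _ (fun x => x)
    (foldA_perm_bi_out iocs) (bi_out_pairwise_lt iocs)
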